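-- pv_equiv track=rewrite | github.com/pedrofbr0/yt-downloader | app.py | _ints_to_spec
-- ===== SOURCE A (Python) =====
-- def _ints_to_spec(ints: list[int]) -> str:
--     """[1,2,3,5,7,8,9] -> '1-3,5,7-9'."""
--     if not ints:
--         return ""
--     ints = sorted(set(ints))
--     ranges: list[str] = []
--     start = prev = ints[0]
--     for n in ints[1:]:
--         if n == prev + 1:
--             prev = n
--         else:
--             ranges.append(f"{start}" if start == prev else f"{start}-{prev}")
--             start = prev = n
--     ranges.append(f"{start}" if start == prev else f"{start}-{prev}")
--     return ",".join(ranges)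
-- ===== SOURCE B (Python) =====
-- def _ints_to_spec(ints: list[int]) -> str:
--     """[1,2,3,5,7,8,9] -> '1-3,5,7-9'."""
--     s = set(ints)
--     starts = sorted(v for v in s if v - 1 not in s)
--     ends = sorted(v for v in s if v + 1 not in s)
--     return ",".join(f"{a}" if a == b else f"{a}-{b}" for a, b in zip(starts, ends))
-- ===== Notes on version B (the rewrite author's own statement) =====
-- stated objective: alternative
-- what changed: Replaced A's sequential start/prev state machine over the sorted list by boundary detection on the set: run starts are elements v with v-1 not in the set, run ends those with v+1 not in the set; the two sorted boundary lists are zipped and formatted.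
import Mathlib
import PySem

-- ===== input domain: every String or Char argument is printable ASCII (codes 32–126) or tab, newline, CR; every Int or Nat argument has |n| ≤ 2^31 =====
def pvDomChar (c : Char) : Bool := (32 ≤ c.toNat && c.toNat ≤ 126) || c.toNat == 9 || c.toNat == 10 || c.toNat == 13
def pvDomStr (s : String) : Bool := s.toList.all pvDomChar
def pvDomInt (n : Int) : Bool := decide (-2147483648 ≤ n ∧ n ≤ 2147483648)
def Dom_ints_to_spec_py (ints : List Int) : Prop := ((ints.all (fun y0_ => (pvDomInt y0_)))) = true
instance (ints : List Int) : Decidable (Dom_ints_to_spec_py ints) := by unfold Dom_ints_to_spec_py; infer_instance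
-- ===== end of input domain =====

-- B replaces A's start/prev scan with set-boundary detection (starts: v with v-1 not in set; ends: v with v+1 not in set), zipped; proved equal on all inputs (objective: alternative).


-- ===== PORT A =====
-- f"{start}" if start == prev else f"{start}-{prev}"
def pvFmtA (a b : Int) : String :=
  if a = b then PySem.Int.toStr a else PySem.Int.toStr a ++ "-" ++ PySem.Int.toStr b

-- the 'for n in ints[1:]' loop with state (ranges, start, prev), including the trailing append
def pvALoop (ranges : List String) (start prev : Int) : List Int → List String
  | [] => ranges ++ [pvFmtA start prev]
  | n :: t =>
    if n = prev + 1 then pvALoop ranges start n t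
    else pvALoop (ranges ++ [pvFmtA start prev]) n n t

def ints_to_spec_py (ints : List Int) : String :=
  if ints = [] then ""
  else
    match PySem.List.sorted (PySem.Set.ofList ints) (fun x => x) false with
    | [] => ""  -- unreachable: sorted(set(ints)) of nonempty ints is nonempty
    | x0 :: rest => PySem.Str.join "," (pvALoop [] x0 x0 rest)

-- ===== PORT B =====
def ints_to_spec_py_alt (ints : List Int) : String :=
  let s : PySem.Set Int := PySem.Set.ofList ints
  let starts := PySem.List.sorted (s.filter (fun v => !(PySem.Set.contains s (v - 1)))) (fun x => x) false
  let ends := PySem.List.sorted (s.filter (fun v => !(PySem.Set.contains s (v + 1)))) (fun x => x) false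
  PySem.Str.join "," ((starts.zip ends).map (fun p =>
    if p.1 = p.2 then PySem.Int.toStr p.1 else PySem.Int.toStr p.1 ++ "-" ++ PySem.Int.toStr p.2))

-- ===== PRECONDITION & SPEC =====
def Spec_ints_to_spec_py (ints : List Int) (out : String) : Prop := out = ints_to_spec_py_alt ints
instance (ints : List Int) (out : String) : Decidable (Spec_ints_to_spec_py ints out) := by unfold Spec_ints_to_spec_py; infer_instance

-- ===== CLAIM (what is proved, stated in full; the proofs are below) =====
def Claim_equal_ints_to_spec_py : Prop := ∀ (ints : List Int), Dom_ints_to_spec_py ints → Spec_ints_to_spec_py ints (ints_to_spec_py ints)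

-- ===== LEMMAS AND PROOFS =====

-- maximal consecutive runs of a list, as (first, last) pairs
def pvRuns : List Int → List (Int × Int)
  | [] => []
  | [x] => [(x, x)]
  | x :: y :: t =>
    match pvRuns (y :: t) with
    | (a, b) :: r => if y = x + 1 then (x, b) :: r else (x, x) :: (a, b) :: r
    | [] => [(x, x)]

lemma pvRuns_cons (x : Int) (t : List Int) : ∃ b r, pvRuns (x :: t) = (x, b) :: r := by
  induction t generalizing x with
  | nil => exact ⟨x, [], rfl⟩
  | cons y t' ih =>
    obtain ⟨b, r, hb⟩ := ih y
    by_cases h : y = x + 1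
    · subst h; exact ⟨b, r, by simp [pvRuns, hb]⟩
    · exact ⟨x, (y, b) :: r, by simp [pvRuns, hb, h]⟩

def pvMergeRun (start prev : Int) : List (Int × Int) → List (Int × Int)
  | [] => [(start, prev)]
  | (a, b) :: r => if a = prev + 1 then (start, b) :: r else (start, prev) :: (a, b) :: r

def pvReStart (s : Int) : List (Int × Int) → List (Int × Int)
  | [] => []
  | (_, b) :: r => (s, b) :: r

lemma pvMergeRun_runs (s n : Int) (t : List Int) :
    pvMergeRun s n (pvRuns t) = pvReStart s (pvRuns (n :: t)) := by
  cases t with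
  | nil => simp [pvRuns, pvMergeRun, pvReStart]
  | cons y t' =>
    obtain ⟨b, r, hb⟩ := pvRuns_cons y t'
    by_cases h : y = n + 1
    · subst h; simp [pvRuns, hb, pvMergeRun, pvReStart]
    · simp [pvRuns, hb, pvMergeRun, pvReStart, h]

lemma pvALoop_eq (t : List Int) (ranges : List String) (start prev : Int) :
    pvALoop ranges start prev t =
      ranges ++ (pvMergeRun start prev (pvRuns t)).map (fun p => pvFmtA p.1 p.2) := by
  induction t generalizing ranges start prev with
  | nil => simp [pvALoop, pvMergeRun, pvRuns]
  | cons n t' ih =>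
    by_cases h : n = prev + 1
    · subst h
      simp only [pvALoop, ite_true]
      rw [ih, pvMergeRun_runs]
      obtain ⟨b, r, hb⟩ := pvRuns_cons (prev + 1) t'
      rw [hb]
      simp [pvMergeRun, pvReStart]
    · simp only [pvALoop, if_neg h]
      rw [ih]
      obtain ⟨b, r, hb⟩ := pvRuns_cons n t'
      have h1 := pvMergeRun_runs n n t'
      rw [hb] at h1
      simp only [pvReStart] at h1
      rw [h1, hb]
      simp [pvMergeRun, h]

-- A's value = format the runs of the sorted distinct list
lemma portA_eq_runs (ints : List Int) :
    ints_to_spec_py ints =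
      PySem.Str.join ","
        ((pvRuns (PySem.List.sorted (PySem.Set.ofList ints) (fun x => x) false)).map
          (fun p => pvFmtA p.1 p.2)) := by
  by_cases hne : ints = []
  · subst hne; rfl
  · rw [ints_to_spec_py, if_neg hne]
    cases hs : PySem.List.sorted (PySem.Set.ofList ints) (fun x => x) false with
    | nil =>
      have h0 : PySem.Set.ofList ints = [] := (PySem.List.sorted_eq_nil_iff _ _ _).mp hs
      cases hc : ints with
      | nil => exact absurd hc hne
      | cons a t =>
        have : a ∈ PySem.Set.ofList ints := (PySem.Set.mem_ofList _ _).mpr (by simp [hc])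
        rw [h0] at this
        simp at this
    | cons x0 rest =>
      simp only []
      rw [pvALoop_eq, pvMergeRun_runs]
      obtain ⟨b, r, hb⟩ := pvRuns_cons x0 rest
      simp [hb, pvReStart]

-- for a strictly increasing list, elements with no left neighbour are exactly the run starts
lemma filter_starts (xs : List Int) (hp : xs.Pairwise (· < ·)) :
    xs.filter (fun v => !(decide (v - 1 ∈ xs))) = (pvRuns xs).map Prod.fst := by
  induction xs with
  | nil => rfl
  | cons x l ih =>
    have hx : ∀ v ∈ l, x < v := (List.pairwise_cons.mp hp).1
    have hpl : l.Pairwise (· < ·) := (List.pairwise_cons.mp hp).2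
    have hpx : (fun v : Int => !decide (v - 1 ∈ x :: l)) x = true := by
      show (!decide (x - 1 ∈ x :: l)) = true
      simp only [Bool.not_eq_true', decide_eq_false_iff_not, List.mem_cons, not_or]
      exact ⟨by omega, fun h => absurd (hx _ h) (by omega)⟩
    rw [List.filter_cons_of_pos (p := fun v : Int => !decide (v - 1 ∈ x :: l)) hpx]
    cases l with
    | nil => simp [pvRuns]
    | cons y t =>
      have hyt : ∀ v ∈ t, y < v := (List.pairwise_cons.mp hpl).1
      obtain ⟨b, r, hb⟩ := pvRuns_cons y t
      have ihl := ih hpl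
      by_cases hxy : y = x + 1
      · subst hxy
        -- x+1 is dropped by the full-list test (its predecessor x is present) …
        have hd : ¬ ((fun v : Int => !decide (v - 1 ∈ x :: (x + 1) :: t)) (x + 1) = true) := by
          show ¬ ((!decide ((x + 1) - 1 ∈ x :: (x + 1) :: t)) = true)
          simp
        -- … but kept by the tail-list test (x is absent from the tail)
        have hk : (fun v : Int => !decide (v - 1 ∈ (x + 1) :: t)) (x + 1) = true := by
          show (!decide ((x + 1) - 1 ∈ (x + 1) :: t)) = true
          simp only [Bool.not_eq_true', decide_eq_false_iff_not, List.mem_cons, not_or]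
          exact ⟨by omega, fun h => absurd (hx _ (List.mem_cons_of_mem _ h)) (by omega)⟩
        have ht : ∀ v ∈ t, (!decide (v - 1 ∈ x :: (x + 1) :: t)) = (!decide (v - 1 ∈ (x + 1) :: t)) := by
          intro v hv
          have hv' := hyt v hv
          have hiff : (v - 1 ∈ x :: (x + 1) :: t) ↔ (v - 1 ∈ (x + 1) :: t) := by
            simp only [List.mem_cons]
            constructor
            · rintro (h | h)
              · omega
              · exact h
            · intro h; exact Or.inr h
          exact congrArg (fun b => !b) (decide_eq_decide.mpr hiff)
        rw [List.filter_cons_of_neg (p := fun v : Int => !decide (v - 1 ∈ x :: (x + 1) :: t)) hd]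
        rw [List.filter_cons_of_pos (p := fun v : Int => !decide (v - 1 ∈ (x + 1) :: t)) hk] at ihl
        rw [List.filter_congr ht]
        rw [hb] at ihl
        simp only [List.map_cons, List.cons.injEq] at ihl
        rw [ihl.2]
        simp [pvRuns, hb]
      · have hy2 : x + 2 ≤ y := by have := hx y (List.mem_cons_self); omega
        have hl : ∀ v ∈ y :: t, (!decide (v - 1 ∈ x :: y :: t)) = (!decide (v - 1 ∈ y :: t)) := by
          intro v hv
          have hvy : y ≤ v := by
            rcases List.mem_cons.mp hv with h | h
            · omega
            · have := hyt v h; omega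
          have hiff : (v - 1 ∈ x :: y :: t) ↔ (v - 1 ∈ y :: t) := by
            simp only [List.mem_cons]
            constructor
            · rintro (h | h)
              · omega
              · exact h
            · intro h; exact Or.inr h
          exact congrArg (fun b => !b) (decide_eq_decide.mpr hiff)
        rw [List.filter_congr hl, ihl, hb]
        simp [pvRuns, hb, hxy]

lemma filter_ends (xs : List Int) (hp : xs.Pairwise (· < ·)) :
    xs.filter (fun v => !(decide (v + 1 ∈ xs))) = (pvRuns xs).map Prod.snd := by
  induction xs with
  | nil => rfl
  | cons x l ih =>
    have hx : ∀ v ∈ l, x < v := (List.pairwise_cons.mp hp).1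
    have hpl : l.Pairwise (· < ·) := (List.pairwise_cons.mp hp).2
    -- for tail elements, x can never be v+1, so the head is irrelevant to their test
    have hl : ∀ v ∈ l, (!decide (v + 1 ∈ x :: l)) = (!decide (v + 1 ∈ l)) := by
      intro v hv
      have hvx := hx v hv
      have hiff : (v + 1 ∈ x :: l) ↔ (v + 1 ∈ l) := by
        simp only [List.mem_cons]
        constructor
        · rintro (h | h)
          · omega
          · exact h
        · intro h; exact Or.inr h
      exact congrArg (fun b => !b) (decide_eq_decide.mpr hiff)
    cases l with
    | nil => simp [pvRuns]
    | cons y t =>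
      have hyt : ∀ v ∈ t, y < v := (List.pairwise_cons.mp hpl).1
      obtain ⟨b, r, hb⟩ := pvRuns_cons y t
      have ihl := ih hpl
      by_cases hxy : y = x + 1
      · subst hxy
        have hd : ¬ ((fun v : Int => !decide (v + 1 ∈ x :: (x + 1) :: t)) x = true) := by
          show ¬ ((!decide (x + 1 ∈ x :: (x + 1) :: t)) = true)
          simp
        rw [List.filter_cons_of_neg (p := fun v : Int => !decide (v + 1 ∈ x :: (x + 1) :: t)) hd, List.filter_congr hl, ihl, hb]
        simp [pvRuns, hb]
      · have hy2 : x + 2 ≤ y := by have := hx y (List.mem_cons_self); omega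
        have hk : (fun v : Int => !decide (v + 1 ∈ x :: y :: t)) x = true := by
          show (!decide (x + 1 ∈ x :: y :: t)) = true
          simp only [Bool.not_eq_true', decide_eq_false_iff_not, List.mem_cons, not_or]
          exact ⟨by omega, by omega, fun h => absurd (hyt _ h) (by omega)⟩
        rw [List.filter_cons_of_pos (p := fun v : Int => !decide (v + 1 ∈ x :: y :: t)) hk, List.filter_congr hl, ihl, hb]
        simp [pvRuns, hb, hxy]

lemma zip_fst_snd {α β : Type} (l : List (α × β)) :
    (l.map Prod.fst).zip (l.map Prod.snd) = l := by
  induction l with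
  | nil => rfl
  | cons p t ih => simp [ih]

theorem pv_main (ints : List Int) : ints_to_spec_py ints = ints_to_spec_py_alt ints := by
  have hxsp : (PySem.List.sorted (PySem.Set.ofList ints) (fun x : Int => x) false).Pairwise (· < ·) :=
    PySem.List.sorted_ofList_pairwise_lt ints
  have hperm : (PySem.List.sorted (PySem.Set.ofList ints) (fun x : Int => x) false).Perm (PySem.Set.ofList ints) :=
    PySem.List.sorted_perm _ _ _
  -- the two PySem.Set.contains tests, rewritten as membership of the sorted list
  have hcontains : ∀ (d : Int) (v : Int),
      (!(PySem.Set.contains (PySem.Set.ofList ints) (v + d))) =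
        (!(decide (v + d ∈ PySem.List.sorted (PySem.Set.ofList ints) (fun x : Int => x) false))) := by
    intro d v
    have hiff : (PySem.Set.contains (PySem.Set.ofList ints) (v + d) = true) ↔
        (decide (v + d ∈ PySem.List.sorted (PySem.Set.ofList ints) (fun x : Int => x) false) = true) := by
      rw [PySem.Set.contains_iff, decide_eq_true_iff, PySem.List.mem_sorted]
    rcases Bool.eq_false_or_eq_true (PySem.Set.contains (PySem.Set.ofList ints) (v + d)) with h | h <;>
      rcases Bool.eq_false_or_eq_true
        (decide (v + d ∈ PySem.List.sorted (PySem.Set.ofList ints) (fun x : Int => x) false)) with h' | h' <;>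
      simp_all
  -- sorted(filter over the set) = filter over the sorted list
  have hsf : ∀ q : Int → Bool,
      PySem.List.sorted ((PySem.Set.ofList ints).filter q) (fun x : Int => x) false =
        (PySem.List.sorted (PySem.Set.ofList ints) (fun x : Int => x) false).filter q := by
    intro q
    exact PySem.List.sorted_eq_of_perm_of_pairwise_lt _ _ _ (hperm.filter q) (hxsp.filter q)
  rw [portA_eq_runs]
  simp only [ints_to_spec_py_alt]
  rw [hsf, hsf]
  have e1 : (fun v : Int => !(PySem.Set.contains (PySem.Set.ofList ints) (v - 1))) =
      (fun v : Int => !(decide (v - 1 ∈ PySem.List.sorted (PySem.Set.ofList ints) (fun x : Int => x) false))) := by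
    funext v
    have := hcontains (-1) v
    simp only [← sub_eq_add_neg] at this
    exact this
  have e2 : (fun v : Int => !(PySem.Set.contains (PySem.Set.ofList ints) (v + 1))) =
      (fun v : Int => !(decide (v + 1 ∈ PySem.List.sorted (PySem.Set.ofList ints) (fun x : Int => x) false))) := by
    funext v
    exact hcontains 1 v
  rw [e1, e2, filter_starts _ hxsp, filter_ends _ hxsp, zip_fst_snd]
  rfl

-- ===== VERDICT (by name: the statement is the Claim_ definition above) =====
theorem ints_to_spec_py_spec : Claim_equal_ints_to_spec_py := by
  intro ints _
  exact pv_main ints
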